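-- pv_equiv track=rewrite | github.com/Jeremie-Silva/challenge_python | challenge_list_1.py | highest_number
-- ===== SOURCE A (Python) =====
-- def highest_number(integer_list: list[int]) -> list[int]:
--     reference = 0
--     results: list[int] = []
--     for item in integer_list:
--         if item > reference:
--             results.clear()
--             results.append(item)
--             reference = item
--         elif item == reference:
--             results.append(item)
--         else:
--             pass
--     return results
-- ===== SOURCE B (Python) =====
-- def highest_number(integer_list: list[int]) -> list[int]:
--     m = max(integer_list, default=0)
--     target = m if m > 0 else 0
--     return [target] * integer_list.count(target)
-- ===== Notes on version B (the rewrite author's own statement) =====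
-- stated objective: simpler
-- what changed: Replaced the single running-max pass with reset/clear state logic by a closed-form two-pass formulation: take the maximum (floored at 0 via a default), then count its occurrences and replicate it.
import Mathlib
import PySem

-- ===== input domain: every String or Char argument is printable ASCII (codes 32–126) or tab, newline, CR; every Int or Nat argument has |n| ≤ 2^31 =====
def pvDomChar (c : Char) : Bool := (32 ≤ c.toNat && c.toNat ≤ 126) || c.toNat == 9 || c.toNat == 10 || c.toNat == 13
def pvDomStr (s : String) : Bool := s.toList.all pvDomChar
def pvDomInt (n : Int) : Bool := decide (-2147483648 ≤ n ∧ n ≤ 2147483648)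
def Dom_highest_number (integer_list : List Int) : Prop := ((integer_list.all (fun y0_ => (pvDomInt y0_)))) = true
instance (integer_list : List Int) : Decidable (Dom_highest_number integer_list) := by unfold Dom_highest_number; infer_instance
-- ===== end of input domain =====

-- B replaces A's running-max pass with reset logic by max-then-count: simpler, same cost.

-- ===== PORT A =====
-- state = (reference, results); one step of A's loop body
def hnStepA (s : Int × List Int) (item : Int) : Int × List Int :=
  if item > s.1 then (item, [item])
  else if item = s.1 then (s.1, s.2 ++ [item])
  else s

def highest_number (integer_list : List Int) : List Int :=
  (integer_list.foldl hnStepA (0, [])).2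

-- ===== PORT B =====
def highest_number_alt (integer_list : List Int) : List Int :=
  let m := (PySem.List.max? integer_list (fun x => x)).getD 0
  let target := if m > 0 then m else 0
  List.replicate (PySem.List.count integer_list target) target

-- ===== PRECONDITION & SPEC =====
def Spec_highest_number (integer_list : List Int) (out : List Int) : Prop := out = highest_number_alt integer_list
instance (integer_list : List Int) (out : List Int) : Decidable (Spec_highest_number integer_list out) := by unfold Spec_highest_number; infer_instance

-- ===== CLAIM (what is proved, stated in full; the proofs are below) =====
def Claim_equal_highest_number : Prop := ∀ (integer_list : List Int), Dom_highest_number integer_list → Spec_highest_number integer_list (highest_number integer_list)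

-- ===== LEMMAS AND PROOFS =====

-- invariant of A's loop: from state (r, replicate c r) it computes the running max R
-- of r and the rest, together with R repeated (count of R, plus c if R is still r).
theorem hn_foldl_inv (l : List Int) : ∀ (r : Int) (c : Nat),
    l.foldl hnStepA (r, List.replicate c r)
      = (l.foldl max r,
         List.replicate ((if l.foldl max r = r then c else 0) + l.count (l.foldl max r))
           (l.foldl max r)) := by
  induction l with
  | nil => intro r c; simp
  | cons x t ih =>
    intro r c
    simp only [List.foldl_cons, hnStepA]
    by_cases hgt : x > r
    · rw [if_pos hgt]
      have hmax : max r x = x := by omega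
      have h1 : ([x] : List Int) = List.replicate 1 x := rfl
      rw [h1, ih x 1]; simp only [hmax]
      have hR : x ≤ t.foldl max x := (PySem.List.le_foldl_max t x).1
      congr 1
      rw [List.count_cons]
      by_cases hRx : t.foldl max x = x
      · have hxr : x ≠ r := by omega
        simp [hRx, hxr]
        omega
      · have : t.foldl max x ≠ r := by
          have := (PySem.List.le_foldl_max t x).1; omega
        simp [hRx, Ne.symm hRx, this]
    · rw [if_neg hgt]
      by_cases heq : x = r
      · rw [if_pos heq]
        have h1 : List.replicate c r ++ [x] = List.replicate (c + 1) r := by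
          subst heq; simp [List.replicate_succ']
        have hmax : max r x = r := by omega
        rw [h1, ih r (c + 1)]; simp only [hmax]
        congr 1
        rw [List.count_cons]
        by_cases hRr : t.foldl max r = r
        · simp [hRr, heq]; omega
        · have : x ≠ t.foldl max r := by subst heq; exact Ne.symm hRr
          simp [hRr, this]
      · rw [if_neg heq]
        have hmax : max r x = r := by omega
        rw [ih r c]; simp only [hmax]
        congr 1
        rw [List.count_cons]
        have : x ≠ t.foldl max r := by
          have := (PySem.List.le_foldl_max t r).1; omega
        simp [this]

-- pull an initial accumulator out of a running max
theorem hn_foldl_max_pull (t : List Int) : ∀ (a x : Int),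
    t.foldl max (max a x) = max a (t.foldl max x) := by
  induction t with
  | nil => intro a x; rfl
  | cons y t ih =>
    intro a x
    simp only [List.foldl_cons]
    rw [max_assoc, ih]

-- ===== VERDICT (by name: the statement is the Claim_ definition above) =====
theorem highest_number_spec : Claim_equal_highest_number := by
  intro integer_list _
  unfold Spec_highest_number highest_number highest_number_alt
  have h0 : (([] : List Int)) = List.replicate 0 (0 : Int) := rfl
  rw [h0, hn_foldl_inv integer_list 0 0]
  cases integer_list with
  | nil => simp
  | cons x t =>
    rw [PySem.List.max?_id_cons]
    simp only [Option.getD_some, PySem.List.count_eq]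
    have hfold : (x :: t).foldl max (0 : Int) = max 0 (t.foldl max x) := by
      simpa using hn_foldl_max_pull t 0 x
    have htarget : (if t.foldl max x > 0 then t.foldl max x else 0)
        = max 0 (t.foldl max x) := by
      split_ifs with h <;> omega
    rw [hfold, htarget]
    simp
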